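-- pv_equiv track=rewrite | github.com/Sarthakgupta7/LeetCode-Questions | 3995-gcd-of-odd-and-even-sums/gcd-of-odd-and-even-sums.py | gcdOfOddEvenSums
-- ===== SOURCE A (Python) =====
-- def gcdOfOddEvenSums(n: int) -> int:
--     e,o=0,0
--     for i in range(1,(2*n)+1):
--         if(i%2==0):
--             e+=i
--         else:
--             o+=i
--     return e-o
-- ===== SOURCE B (Python) =====
-- def gcdOfOddEvenSums(n: int) -> int:
--     # Closed form: each consecutive (even, odd) pair contributes the same unit
--     # amount to e - o, so the answer is n when positive, else zero.
--     return n if n > 0 else 0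
-- ===== Notes on version B (the rewrite author's own statement) =====
-- stated objective: faster
-- what changed: Replaces A's linear accumulation loop over the range with the closed form max(n, 0): consecutive even/odd pairs each contribute the same unit amount to e-o.
import Mathlib
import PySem

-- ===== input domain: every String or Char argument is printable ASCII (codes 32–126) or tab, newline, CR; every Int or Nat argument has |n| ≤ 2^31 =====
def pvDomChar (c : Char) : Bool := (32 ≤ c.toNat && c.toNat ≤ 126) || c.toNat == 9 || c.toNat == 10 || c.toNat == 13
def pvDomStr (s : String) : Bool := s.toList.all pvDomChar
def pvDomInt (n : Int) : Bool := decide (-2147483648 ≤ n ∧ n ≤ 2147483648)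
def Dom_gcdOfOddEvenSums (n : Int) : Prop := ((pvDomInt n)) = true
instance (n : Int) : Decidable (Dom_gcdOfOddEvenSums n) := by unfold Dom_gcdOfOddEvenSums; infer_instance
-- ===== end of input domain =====

-- B replaces A's O(n) accumulation loop by the closed form max(n, 0).

-- ===== PORT A =====
def gcdOfOddEvenSums (n : Int) : Int :=
  let eo : Int × Int :=
    (PySem.List.pyRange 1 (2 * n + 1) 1).foldl
      (fun (p : Int × Int) i =>
        if PySem.Int.mod i 2 = 0 then (p.1 + i, p.2) else (p.1, p.2 + i))
      (0, 0)
  eo.1 - eo.2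

-- ===== PORT B =====
def gcdOfOddEvenSums_alt (n : Int) : Int := if n > 0 then n else 0

-- ===== PRECONDITION & SPEC =====
def Spec_gcdOfOddEvenSums (n : Int) (out : Int) : Prop := out = gcdOfOddEvenSums_alt n
instance (n : Int) (out : Int) : Decidable (Spec_gcdOfOddEvenSums n out) := by unfold Spec_gcdOfOddEvenSums; infer_instance

-- ===== CLAIM (what is proved, stated in full; the proofs are below) =====
def Claim_equal_gcdOfOddEvenSums : Prop := ∀ (n : Int), Dom_gcdOfOddEvenSums n → Spec_gcdOfOddEvenSums n (gcdOfOddEvenSums n)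

-- ===== LEMMAS AND PROOFS =====

-- The loop's state after processing range(1, 2k+1): evens sum to k(k+1), odds to k².
theorem pv_loop_eq (k : Nat) (e o : Int) :
    (PySem.List.pyRange 1 (2 * (k : Int) + 1) 1).foldl
      (fun (p : Int × Int) i =>
        if PySem.Int.mod i 2 = 0 then (p.1 + i, p.2) else (p.1, p.2 + i))
      (e, o)
    = (e + (k : Int) * ((k : Int) + 1), o + (k : Int) * (k : Int)) := by
  induction k generalizing e o with
  | zero =>
      rw [PySem.List.pyRange_one_eq_nil (by omega)]
      simp
  | succ m ih =>
      have hsplit := PySem.List.pyRange_one_append 1 (2 * (m : Int) + 1)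
        (2 * ((m : Int) + 1) + 1) (by omega) (by omega)
      have htail : PySem.List.pyRange (2 * (m : Int) + 1) (2 * ((m : Int) + 1) + 1) 1
          = [2 * (m : Int) + 1, 2 * (m : Int) + 2] := by
        rw [PySem.List.pyRange_one_cons (by omega), PySem.List.pyRange_one_cons (by omega),
            PySem.List.pyRange_one_eq_nil (by omega)]
        norm_num
        omega
      have hodd : PySem.Int.mod (2 * (m : Int) + 1) 2 = 1 := by
        rw [PySem.Int.mod_eq_emod_of_pos (by omega)]; omega
      have heven : PySem.Int.mod (2 * (m : Int) + 2) 2 = 0 := by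
        rw [PySem.Int.mod_eq_emod_of_pos (by omega)]; omega
      push_cast
      push_cast at hsplit htail ih
      rw [hsplit, htail, List.foldl_append, ih]
      simp only [List.foldl_cons, List.foldl_nil, hodd, heven,
        one_ne_zero, reduceIte, Prod.mk.injEq]
      constructor <;> ring

theorem pv_nonpos (n : Int) (h : n ≤ 0) : gcdOfOddEvenSums n = 0 := by
  unfold gcdOfOddEvenSums
  rw [PySem.List.pyRange_one_eq_nil (by omega)]
  simp

-- ===== VERDICT (by name: the statement is the Claim_ definition above) =====
theorem gcdOfOddEvenSums_spec : Claim_equal_gcdOfOddEvenSums := by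
  intro n _
  unfold Spec_gcdOfOddEvenSums gcdOfOddEvenSums_alt
  by_cases h : n > 0
  · have hk : n = ((n.toNat : Int)) := by omega
    simp only [if_pos h]
    unfold gcdOfOddEvenSums
    rw [hk, pv_loop_eq n.toNat 0 0]
    ring
  · rw [pv_nonpos n (by omega)]
    simp [h]
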